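-- pv_equiv track=rewrite | github.com/RomainPattyn/MasterThesis | Tools.py | has_enough_neighbors
-- ===== SOURCE A (Python) =====
-- def has_enough_neighbors(coordinate, half_window, threshold, coordinates):
--     neighbors = 0
--     for x_shift in range(- half_window, half_window + 1):
--         for y_shift in range(- half_window, half_window + 1):
--             if (coordinate[0] + x_shift, coordinate[1] + y_shift) in coordinates:
--                 neighbors += 1
--                 if neighbors > threshold:
--                     return True
--     return False
-- ===== SOURCE B (Python) =====
-- def has_enough_neighbors(coordinate, half_window, threshold, coordinates):
--     # Scan the points once (deduplicated, since a window cell can only be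
--     # counted once) instead of enumerating every cell of the window.
--     cx, cy = coordinate[0], coordinate[1]
--     count = 0
--     for px, py in dict.fromkeys(coordinates):
--         if -half_window <= px - cx <= half_window and -half_window <= py - cy <= half_window:
--             count += 1
--             if count > threshold:
--                 return True
--     return False
-- ===== Notes on version B (the rewrite author's own statement) =====
-- stated objective: faster
-- what changed: Instead of enumerating all (2h+1)^2 window cells and testing each for membership in the point list, B makes a single pass over the (deduplicated) points, counting those whose offset lies in the window and early-exiting at the threshold.
import Mathlib
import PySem

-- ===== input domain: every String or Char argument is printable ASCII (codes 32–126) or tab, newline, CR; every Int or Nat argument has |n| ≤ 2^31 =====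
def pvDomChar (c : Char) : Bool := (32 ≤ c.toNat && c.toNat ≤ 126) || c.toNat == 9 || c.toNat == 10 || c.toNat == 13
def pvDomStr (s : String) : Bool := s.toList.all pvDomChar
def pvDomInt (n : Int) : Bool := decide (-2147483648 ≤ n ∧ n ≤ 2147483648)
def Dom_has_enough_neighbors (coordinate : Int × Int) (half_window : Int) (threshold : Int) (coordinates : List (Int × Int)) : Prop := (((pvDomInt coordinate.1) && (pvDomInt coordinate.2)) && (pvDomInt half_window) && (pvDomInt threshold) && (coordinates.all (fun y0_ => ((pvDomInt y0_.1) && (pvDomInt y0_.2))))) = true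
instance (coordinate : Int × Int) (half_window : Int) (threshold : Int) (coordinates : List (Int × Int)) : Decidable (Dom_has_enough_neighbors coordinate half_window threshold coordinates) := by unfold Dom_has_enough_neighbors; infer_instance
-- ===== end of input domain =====

-- B replaces the O(h^2 * n) cell-by-cell window scan by a single early-exiting pass
-- over the deduplicated points (objective: faster).


-- ===== PORT A =====
-- inner 'for y_shift in range(-half_window, half_window+1)' loop; none = 'return True' happened
def pvInnerA (coordinate : Int × Int) (threshold : Int) (coordinates : List (Int × Int))
    (x_shift : Int) (ys : List Int) (neighbors : Int) : Option Int :=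
  match ys with
  | [] => some neighbors
  | y_shift :: rest =>
    if (coordinate.1 + x_shift, coordinate.2 + y_shift) ∈ coordinates then
      if neighbors + 1 > threshold then none
      else pvInnerA coordinate threshold coordinates x_shift rest (neighbors + 1)
    else pvInnerA coordinate threshold coordinates x_shift rest neighbors

-- outer 'for x_shift in range(-half_window, half_window+1)' loop
def pvOuterA (coordinate : Int × Int) (half_window threshold : Int) (coordinates : List (Int × Int))
    (xs : List Int) (neighbors : Int) : Option Int :=
  match xs with
  | [] => some neighbors
  | x_shift :: rest =>
    match pvInnerA coordinate threshold coordinates x_shift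
        (PySem.List.pyRange (-half_window) (half_window + 1) 1) neighbors with
    | none => none
    | some n' => pvOuterA coordinate half_window threshold coordinates rest n'

def has_enough_neighbors (coordinate : Int × Int) (half_window : Int) (threshold : Int) (coordinates : List (Int × Int)) : Bool :=
  match pvOuterA coordinate half_window threshold coordinates
      (PySem.List.pyRange (-half_window) (half_window + 1) 1) 0 with
  | none => true
  | some _ => false

-- ===== PORT B =====
-- single pass over the deduplicated points, early exit at the threshold
def pvLoopB (coordinate : Int × Int) (half_window threshold : Int)
    (pts : List (Int × Int)) (count : Int) : Bool :=
  match pts with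
  | [] => false
  | p :: rest =>
    if -half_window ≤ p.1 - coordinate.1 ∧ p.1 - coordinate.1 ≤ half_window ∧
       -half_window ≤ p.2 - coordinate.2 ∧ p.2 - coordinate.2 ≤ half_window then
      if count + 1 > threshold then true
      else pvLoopB coordinate half_window threshold rest (count + 1)
    else pvLoopB coordinate half_window threshold rest count

def has_enough_neighbors_alt (coordinate : Int × Int) (half_window : Int) (threshold : Int) (coordinates : List (Int × Int)) : Bool :=
  pvLoopB coordinate half_window threshold (PySem.List.dedup coordinates) 0

-- ===== PRECONDITION & SPEC =====
def Spec_has_enough_neighbors (coordinate : Int × Int) (half_window : Int) (threshold : Int) (coordinates : List (Int × Int)) (out : Bool) : Prop := out = has_enough_neighbors_alt coordinate half_window threshold coordinates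
instance (coordinate : Int × Int) (half_window : Int) (threshold : Int) (coordinates : List (Int × Int)) (out : Bool) : Decidable (Spec_has_enough_neighbors coordinate half_window threshold coordinates out) := by unfold Spec_has_enough_neighbors; infer_instance

-- ===== CLAIM (what is proved, stated in full; the proofs are below) =====
def Claim_equal_has_enough_neighbors : Prop := ∀ (coordinate : Int × Int) (half_window : Int) (threshold : Int) (coordinates : List (Int × Int)), Dom_has_enough_neighbors coordinate half_window threshold coordinates → Spec_has_enough_neighbors coordinate half_window threshold coordinates (has_enough_neighbors coordinate half_window threshold coordinates)

-- ===== LEMMAS AND PROOFS =====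

lemma pvInnerA_eq (c : Int × Int) (t : Int) (coords : List (Int × Int)) (x : Int)
    (ys : List Int) (n : Int) :
    pvInnerA c t coords x ys n =
      (if 1 ≤ ((ys.map fun y => (c.1 + x, c.2 + y)).countP fun q => decide (q ∈ coords)) ∧
          t < n + (((ys.map fun y => (c.1 + x, c.2 + y)).countP fun q => decide (q ∈ coords) : Nat) : Int)
       then none
       else some (n + (((ys.map fun y => (c.1 + x, c.2 + y)).countP fun q => decide (q ∈ coords) : Nat) : Int))) := by
  induction ys generalizing n with
  | nil => simp [pvInnerA]
  | cons y rest ih =>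
    simp only [pvInnerA, List.map_cons]
    by_cases hm : (c.1 + x, c.2 + y) ∈ coords
    · rw [if_pos hm, List.countP_cons_of_pos (by simpa using hm)]
      by_cases hgt : n + 1 > t
      · rw [if_pos hgt, if_pos ⟨by omega, by push_cast; omega⟩]
      · rw [if_neg hgt, ih]
        by_cases h2 : 1 ≤ ((rest.map fun y => (c.1 + x, c.2 + y)).countP fun q => decide (q ∈ coords)) ∧
            t < n + 1 + (((rest.map fun y => (c.1 + x, c.2 + y)).countP fun q => decide (q ∈ coords) : Nat) : Int)
        · rw [if_pos h2, if_pos ⟨by omega, by push_cast at h2 ⊢; omega⟩]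
        · rw [if_neg h2, if_neg (by push_cast at h2 ⊢; omega)]
          congr 1
          push_cast
          ring
    · rw [if_neg hm, List.countP_cons_of_neg (by simpa using hm)]
      exact ih n

lemma pvOuterA_eq (c : Int × Int) (h t : Int) (coords : List (Int × Int))
    (xs : List Int) (n : Int) :
    pvOuterA c h t coords xs n =
      (if 1 ≤ ((xs.flatMap fun x => (PySem.List.pyRange (-h) (h + 1) 1).map
                  fun y => (c.1 + x, c.2 + y)).countP fun q => decide (q ∈ coords)) ∧
          t < n + (((xs.flatMap fun x => (PySem.List.pyRange (-h) (h + 1) 1).map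
                  fun y => (c.1 + x, c.2 + y)).countP fun q => decide (q ∈ coords) : Nat) : Int)
       then none
       else some (n + (((xs.flatMap fun x => (PySem.List.pyRange (-h) (h + 1) 1).map
                  fun y => (c.1 + x, c.2 + y)).countP fun q => decide (q ∈ coords) : Nat) : Int))) := by
  induction xs generalizing n with
  | nil => simp [pvOuterA]
  | cons x rest ih =>
    simp only [pvOuterA, List.flatMap_cons, List.countP_append]
    rw [pvInnerA_eq]
    by_cases h1 : 1 ≤ (((PySem.List.pyRange (-h) (h + 1) 1).map fun y => (c.1 + x, c.2 + y)).countP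
          fun q => decide (q ∈ coords)) ∧
        t < n + ((((PySem.List.pyRange (-h) (h + 1) 1).map fun y => (c.1 + x, c.2 + y)).countP
          fun q => decide (q ∈ coords) : Nat) : Int)
    · rw [if_pos h1, if_pos ⟨by omega, by push_cast at h1 ⊢; omega⟩]
    · rw [if_neg h1]
      show pvOuterA c h t coords rest _ = _
      rw [ih]
      by_cases h2 : 1 ≤ ((rest.flatMap fun x => (PySem.List.pyRange (-h) (h + 1) 1).map
            fun y => (c.1 + x, c.2 + y)).countP fun q => decide (q ∈ coords)) ∧
          t < n + ((((PySem.List.pyRange (-h) (h + 1) 1).map fun y => (c.1 + x, c.2 + y)).countP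
                fun q => decide (q ∈ coords) : Nat) : Int)
            + (((rest.flatMap fun x => (PySem.List.pyRange (-h) (h + 1) 1).map
            fun y => (c.1 + x, c.2 + y)).countP fun q => decide (q ∈ coords) : Nat) : Int)
      · rw [if_pos h2, if_pos ⟨by omega, by push_cast at h1 h2 ⊢; omega⟩]
      · rw [if_neg h2, if_neg (by push_cast at h1 h2 ⊢; omega)]
        congr 1
        push_cast
        ring

lemma pvLoopB_eq (c : Int × Int) (h t : Int) (pts : List (Int × Int)) (n : Int) :
    pvLoopB c h t pts n =
      decide (1 ≤ (pts.countP fun p => decide (-h ≤ p.1 - c.1 ∧ p.1 - c.1 ≤ h ∧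
                    -h ≤ p.2 - c.2 ∧ p.2 - c.2 ≤ h)) ∧
              t < n + ((pts.countP fun p => decide (-h ≤ p.1 - c.1 ∧ p.1 - c.1 ≤ h ∧
                    -h ≤ p.2 - c.2 ∧ p.2 - c.2 ≤ h) : Nat) : Int)) := by
  induction pts generalizing n with
  | nil => simp [pvLoopB]
  | cons p rest ih =>
    simp only [pvLoopB]
    by_cases hw : -h ≤ p.1 - c.1 ∧ p.1 - c.1 ≤ h ∧ -h ≤ p.2 - c.2 ∧ p.2 - c.2 ≤ h
    · rw [if_pos hw, List.countP_cons_of_pos (by simpa using hw)]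
      by_cases hgt : n + 1 > t
      · rw [if_pos hgt, eq_comm, decide_eq_true_iff]
        exact ⟨by omega, by push_cast; omega⟩
      · rw [if_neg hgt, ih, decide_eq_decide, Nat.cast_add, Nat.cast_one]
        omega
    · rw [if_neg hw, List.countP_cons_of_neg (by simpa using hw)]
      exact ih n

-- the two filtered lists are permutations (both nodup, same membership), so the counts agree
lemma counts_eq (c : Int × Int) (h : Int) (coords : List (Int × Int)) :
    ((PySem.List.pyRange (-h) (h + 1) 1).flatMap fun x =>
        (PySem.List.pyRange (-h) (h + 1) 1).map fun y => (c.1 + x, c.2 + y)).countP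
      (fun q => decide (q ∈ coords)) =
    (PySem.List.dedup coords).countP
      (fun p => decide (-h ≤ p.1 - c.1 ∧ p.1 - c.1 ≤ h ∧ -h ≤ p.2 - c.2 ∧ p.2 - c.2 ≤ h)) := by
  rw [List.countP_eq_length_filter, List.countP_eq_length_filter]
  apply List.Perm.length_eq
  rw [List.perm_ext_iff_of_nodup]
  · intro q
    simp only [List.mem_filter, List.mem_flatMap, List.mem_map, PySem.List.mem_pyRange_one,
      PySem.List.mem_dedup, decide_eq_true_iff]
    constructor
    · rintro ⟨⟨x, ⟨hx1, hx2⟩, y, ⟨hy1, hy2⟩, rfl⟩, hq⟩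
      exact ⟨hq, by simp; omega⟩
    · rintro ⟨hq, hw⟩
      refine ⟨⟨q.1 - c.1, by omega, q.2 - c.2, by omega, ?_⟩, hq⟩
      ext <;> simp
  · apply List.Nodup.filter
    rw [List.nodup_flatMap]
    constructor
    · intro x _
      exact (PySem.List.nodup_pyRange_one _ _).map (fun a b hab => by
        simpa using congrArg Prod.snd hab)
    · refine (PySem.List.nodup_pyRange_one _ _).imp ?_  -- pairwise Ne → pairwise disjoint
      intro a b hab q hqa hqb
      simp only [List.mem_map] at hqa hqb
      obtain ⟨y1, _, rfl⟩ := hqa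
      obtain ⟨y2, _, h2⟩ := hqb
      exact hab (by simpa using (congrArg Prod.fst h2).symm)
  · exact (PySem.List.nodup_dedup coords).filter _

-- ===== VERDICT (by name: the statement is the Claim_ definition above) =====
theorem has_enough_neighbors_spec : Claim_equal_has_enough_neighbors := by
  intro c h t coords _
  unfold Spec_has_enough_neighbors has_enough_neighbors has_enough_neighbors_alt
  rw [pvOuterA_eq, pvLoopB_eq, counts_eq]
  by_cases hC : 1 ≤ ((PySem.List.dedup coords).countP fun p => decide (-h ≤ p.1 - c.1 ∧
        p.1 - c.1 ≤ h ∧ -h ≤ p.2 - c.2 ∧ p.2 - c.2 ≤ h)) ∧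
      t < 0 + (((PySem.List.dedup coords).countP fun p => decide (-h ≤ p.1 - c.1 ∧
        p.1 - c.1 ≤ h ∧ -h ≤ p.2 - c.2 ∧ p.2 - c.2 ≤ h) : Nat) : Int)
  · rw [if_pos hC]
    exact (decide_eq_true hC).symm
  · rw [if_neg hC]
    exact (decide_eq_false hC).symm
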